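-- pv_equiv track=rewrite | github.com/viszi/codes | CodeWars/7kyu/Python/020-last-digits-of-a-number.py | solution
-- ===== SOURCE A (Python) =====
-- def solution(n, d):
--     if d <= 0:
--         return []
--
--     result = []
--
--     while len(result) < d and n > 0:
--         result.insert(0, n % 10)
--         n = n//10
--
--     return result
-- ===== SOURCE B (Python) =====
-- def solution(n, d):
--     if d <= 0 or n <= 0:
--         return []
--     return [int(c) for c in str(n)[-d:]]
-- ===== Notes on version B (the rewrite author's own statement) =====
-- stated objective: alternative
-- what changed: B converts n to its decimal string once and slices the last d characters back to ints, replacing A's mod/div extraction loop with front insertion.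
import Mathlib
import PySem

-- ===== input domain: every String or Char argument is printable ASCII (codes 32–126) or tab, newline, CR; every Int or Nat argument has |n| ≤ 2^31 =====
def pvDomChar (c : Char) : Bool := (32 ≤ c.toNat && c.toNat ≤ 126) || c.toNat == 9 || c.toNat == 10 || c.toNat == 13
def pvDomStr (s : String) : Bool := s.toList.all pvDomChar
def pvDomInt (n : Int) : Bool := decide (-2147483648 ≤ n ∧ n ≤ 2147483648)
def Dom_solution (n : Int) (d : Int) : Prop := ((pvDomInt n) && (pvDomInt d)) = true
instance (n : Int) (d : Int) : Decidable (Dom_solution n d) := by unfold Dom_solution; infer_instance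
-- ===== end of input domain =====

-- B replaces A's mod/div digit-extraction loop by one conversion of n to its decimal string
-- and a slice of the last d characters mapped back to ints; objective: alternative.

-- ===== PORT A =====
-- the while loop of A: while len(result) < d and n > 0: result.insert(0, n % 10); n = n // 10
def solLoopA (n : Int) (res : List Int) (d : Int) : List Int :=
  if _h : (res.length : Int) < d ∧ 0 < n then
    solLoopA (PySem.Int.floordiv n 10) (PySem.List.insert res 0 (PySem.Int.mod n 10)) d
  else res
termination_by n.toNat
decreasing_by
  rw [PySem.Int.floordiv_eq_ediv_of_pos (by norm_num)]
  omega

def solution (n : Int) (d : Int) : List Int :=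
  if d ≤ 0 then [] else solLoopA n [] d

-- ===== PORT B =====
def solution_alt (n : Int) (d : Int) : List Int :=
  if d ≤ 0 ∨ n ≤ 0 then []
  else (PySem.List.slice (PySem.Int.toChars n) (some (-d)) none).map
    (fun c => ((c.toNat : Int) - 48))
    -- int(c): exact on the decimal digit characters '0'..'9' that str(n) produces for n > 0

-- ===== PRECONDITION & SPEC =====
def Spec_solution (n : Int) (d : Int) (out : List Int) : Prop := out = solution_alt n d
instance (n : Int) (d : Int) (out : List Int) : Decidable (Spec_solution n d out) := by unfold Spec_solution; infer_instance

-- ===== CLAIM =====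
def Claim_equal_solution : Prop := ∀ (n : Int) (d : Int), Dom_solution n d → Spec_solution n d (solution n d)

-- ===== LEMMAS AND PROOFS =====

-- str-side: Nat.toDigitsCore builds exactly the reversed decimal digit list
theorem toDigitsCore_eq_digits : ∀ (f n : Nat) (acc : List Char), 0 < n → n < f →
    Nat.toDigitsCore 10 f n acc = ((Nat.digits 10 n).map Nat.digitChar).reverse ++ acc := by
  intro f
  induction f with
  | zero => intro n acc _ h; omega
  | succ f ih =>
    intro n acc hn _hf
    rw [Nat.toDigitsCore]
    rw [Nat.digits_def' (by norm_num : (1:Nat) < 10) hn]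
    by_cases h0 : n / 10 = 0
    · have hlt : n < 10 := by omega
      rw [if_pos h0, h0, Nat.digits_zero]
      simp [Nat.mod_eq_of_lt hlt]
    · rw [if_neg h0,
        ih (n / 10) (Nat.digitChar (n % 10) :: acc) (by omega)
          (by have := Nat.div_lt_self hn (by norm_num : (1:Nat) < 10); omega)]
      simp

theorem digitChar_toNat (m : Nat) (h : m < 10) : (Nat.digitChar m).toNat = 48 + m := by
  interval_cases m <;> decide

-- A-side: the loop returns the reversed take of the little-endian digit list, on top of res
theorem solLoopA_eq : ∀ (n : Int) (res : List Int) (d : Int),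
    solLoopA n res d
      = (((Nat.digits 10 n.toNat).map Int.ofNat).take (d - res.length).toNat).reverse
          ++ res := by
  intro n res d
  induction n, res using solLoopA.induct d with
  | case1 n res h ih =>
    rw [solLoopA, dif_pos h, ih]
    have hn : 0 < n := h.2
    have hnn : n = ((n.toNat : Nat) : Int) := by omega
    have hfd : PySem.Int.floordiv n 10 = ((n.toNat / 10 : Nat) : Int) := by
      rw [hnn]; exact_mod_cast PySem.Int.floordiv_natCast n.toNat 10
    have hmd : PySem.Int.mod n 10 = ((n.toNat % 10 : Nat) : Int) := by
      rw [hnn]; exact_mod_cast PySem.Int.mod_natCast n.toNat 10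
    rw [hfd, hmd, Nat.digits_def' (by norm_num : (1:Nat) < 10) (by omega : 0 < n.toNat)]
    simp only [PySem.List.insert_zero, List.length_cons, Int.toNat_natCast, List.map_cons]
    have h2 : (d - ((res.length : Int))).toNat = (d - ((res.length : Int) + 1)).toNat + 1 := by
      have := h.1; omega
    push_cast
    rw [h2]
    simp [List.take_succ_cons]
  | case2 n res h =>
    rw [solLoopA, dif_neg h]
    by_cases hr : (res.length : Int) < d
    · have hn : ¬ 0 < n := fun hn' => h ⟨hr, hn'⟩
      have : n.toNat = 0 := by omega
      simp [this]
    · have : (d - (res.length : Int)).toNat = 0 := by omega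
      rw [this]
      simp

-- ===== VERDICT =====
theorem solution_spec : Claim_equal_solution := by
  intro n d _
  unfold Spec_solution solution solution_alt
  by_cases hd : d ≤ 0
  · simp [hd]
  · rw [if_neg hd]
    by_cases hn : n ≤ 0
    · rw [if_pos (Or.inr hn), solLoopA,
        dif_neg (by omega : ¬ ((([] : List Int).length : Int) < d ∧ 0 < n))]
    · rw [if_neg (by omega : ¬ (d ≤ 0 ∨ n ≤ 0))]
      have hn' : 0 < n.toNat := by omega
      -- unfold str(n) on the positive branch
      have htc : PySem.Int.toChars n
          = ((Nat.digits 10 n.toNat).map Nat.digitChar).reverse := by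
        rw [PySem.Int.toChars, if_neg (by omega : ¬ n < 0), Nat.toDigits,
          toDigitsCore_eq_digits (n.toNat + 1) n.toNat [] hn' (by omega)]
        simp
      have hdneg : -d = -((d.toNat : Nat) : Int) := by omega
      rw [htc, hdneg,
        PySem.List.slice_from_neg_natCast _ d.toNat (by omega)]
      set ys : List Char := (Nat.digits 10 n.toNat).map Nat.digitChar with hys
      rw [List.length_reverse, List.drop_reverse]
      have htake : ys.take (ys.length - (ys.length - d.toNat)) = ys.take d.toNat := by
        rcases le_or_gt d.toNat ys.length with hle | hgt
        · congr 1; omega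
        · rw [List.take_of_length_le (by omega), List.take_of_length_le (by omega)]
      rw [htake, solLoopA_eq]
      simp only [List.length_nil, Nat.cast_zero, sub_zero, List.append_nil, hys]
      rw [List.map_reverse]
      congr 1
      rw [← List.map_take, ← List.map_take, List.map_map]
      apply List.map_congr_left
      intro m hm
      have hm10 : m < 10 :=
        Nat.digits_lt_base (by norm_num) (List.mem_of_mem_take hm)
      simp only [Function.comp_apply, digitChar_toNat m hm10, Int.ofNat_eq_natCast]
      push_cast
      omega
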